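-- pv_equiv track=rewrite | github.com/standbyme626/smart_hospital_agent | backend/app/api/v1/endpoints/auth.py | _resolve_sso_role
-- ===== SOURCE A (Python) =====
-- from typing import Any, Dict, List
--
-- def _resolve_sso_role(groups: List[str], role_map: Dict[str, List[str]]) -> str:
--     normalized_groups = {str(item or "").strip() for item in groups if str(item or "").strip()}
--     if not normalized_groups:
--         return "viewer"
--     for role in ("admin", "operator", "auditor"):
--         candidates = set(role_map.get(role) or [])
--         if normalized_groups.intersection(candidates):
--             return role
--     return "viewer"
-- ===== SOURCE B (Python) =====
-- ROLE_PRIORITY = ("admin", "operator", "auditor")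
--
--
-- def _resolve_sso_role(groups, role_map):
--     index = {}
--     for rank, role in enumerate(ROLE_PRIORITY):
--         for group in role_map.get(role) or []:
--             if group not in index:
--                 index[group] = (rank, role)
--     best = None
--     for item in groups:
--         name = str(item or "").strip()
--         if not name:
--             continue
--         hit = index.get(name)
--         if hit is not None and (best is None or hit[0] < best[0]):
--             best = hit
--     return best[1] if best is not None else "viewer"
-- ===== Notes on version B (the rewrite author's own statement) =====
-- stated objective: alternative
-- what changed: Replaces A's build-a-set-then-intersect-per-role structure by a reverse index (group -> (rank, role)) built once from the role map, then a single pass over the groups keeping the minimum-rank hit; no sets or intersections.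
import Mathlib
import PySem

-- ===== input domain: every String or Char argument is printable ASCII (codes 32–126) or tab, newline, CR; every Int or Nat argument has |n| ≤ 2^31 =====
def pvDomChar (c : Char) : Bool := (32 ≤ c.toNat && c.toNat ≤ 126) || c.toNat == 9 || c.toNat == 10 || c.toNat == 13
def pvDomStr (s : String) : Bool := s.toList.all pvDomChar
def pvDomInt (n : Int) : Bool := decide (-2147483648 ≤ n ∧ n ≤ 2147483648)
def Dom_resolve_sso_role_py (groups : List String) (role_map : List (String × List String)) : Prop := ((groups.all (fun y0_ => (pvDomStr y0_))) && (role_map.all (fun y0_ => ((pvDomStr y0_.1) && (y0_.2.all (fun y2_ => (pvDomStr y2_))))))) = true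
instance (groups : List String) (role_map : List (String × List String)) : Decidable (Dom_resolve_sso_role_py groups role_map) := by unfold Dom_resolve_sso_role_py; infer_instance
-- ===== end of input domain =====

-- B replaces A's per-role set intersections by a reverse index (group -> (rank, role)) plus one
-- minimum-keeping pass over the groups; objective: alternative decomposition, same cost.

-- ===== PORT A =====
-- shared by both Pythons: `str(item or "").strip()` (items are str, so str(·) is identity)
def normItem (item : String) : String :=
  PySem.Str.strip (if item == "" then "" else item)

-- shared by both Pythons: `role_map.get(role) or []`
def pyOrList (v : Option (List String)) : List String :=
  match v with
  | none => []
  | some l => if l.isEmpty then [] else l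

-- A's `for role in ("admin","operator","auditor")` loop
def aRoleLoop (norm : PySem.Set String) (role_map : List (String × List String)) :
    List String → String
  | [] => "viewer"
  | role :: rest =>
    let candidates : PySem.Set String :=
      PySem.Set.ofList (pyOrList ((PySem.Dict.mk role_map).get? role))
    if (PySem.Set.inter norm candidates).isEmpty then aRoleLoop norm role_map rest else role

def resolve_sso_role_py (groups : List String) (role_map : List (String × List String)) : String :=
  let normalized_groups : PySem.Set String :=
    PySem.Set.ofList ((groups.map normItem).filter (fun s => !(s == "")))
  if normalized_groups.isEmpty then "viewer"
  else aRoleLoop normalized_groups role_map ["admin", "operator", "auditor"]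

-- ===== PORT B =====
def pvRoles : List String := ["admin", "operator", "auditor"]

-- `for rank, role in enumerate(ROLE_PRIORITY): for group in role_map.get(role) or []: ...`
def bIndex (role_map : List (String × List String)) : PySem.Dict String (Int × String) :=
  (PySem.List.enumerate pvRoles).foldl
    (fun index p =>
      (pyOrList ((PySem.Dict.mk role_map).get? p.2)).foldl
        (fun index group => if index.contains group then index else index.insert group (p.1, p.2))
        index)
    PySem.Dict.empty

-- `if hit is not None and (best is None or hit[0] < best[0]): best = hit`
def bBetter (best : Option (Int × String)) (hit : Option (Int × String)) :
    Option (Int × String) :=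
  match hit with
  | none => best
  | some h =>
    match best with
    | none => some h
    | some b => if h.1 < b.1 then some h else some b

-- B's single pass over `groups`
def bScan (index : PySem.Dict String (Int × String)) (best : Option (Int × String)) :
    List String → Option (Int × String)
  | [] => best
  | item :: rest =>
    let name := normItem item
    if name == "" then bScan index best rest
    else bScan index (bBetter best (index.get? name)) rest

def resolve_sso_role_py_alt (groups : List String) (role_map : List (String × List String)) : String :=
  match bScan (bIndex role_map) none groups with
  | some b => b.2
  | none => "viewer"

-- ===== PRECONDITION & SPEC =====
def Spec_resolve_sso_role_py (groups : List String) (role_map : List (String × List String)) (out : String) : Prop := out = resolve_sso_role_py_alt groups role_map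
instance (groups : List String) (role_map : List (String × List String)) (out : String) : Decidable (Spec_resolve_sso_role_py groups role_map out) := by unfold Spec_resolve_sso_role_py; infer_instance

-- ===== CLAIM (what is proved, stated in full; the proofs are below) =====
def Claim_equal_resolve_sso_role_py : Prop := ∀ (groups : List String) (role_map : List (String × List String)), Dom_resolve_sso_role_py groups role_map → Spec_resolve_sso_role_py groups role_map (resolve_sso_role_py groups role_map)

-- ===== LEMMAS AND PROOFS =====

def candsOf (role_map : List (String × List String)) (role : String) : List String :=
  pyOrList ((PySem.Dict.mk role_map).get? role)

def hitVal (role_map : List (String × List String)) (x : String) : Option (Int × String) :=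
  if (candsOf role_map "admin").contains x then some (0, "admin")
  else if (candsOf role_map "operator").contains x then some (1, "operator")
  else if (candsOf role_map "auditor").contains x then some (2, "auditor")
  else none

def hC (c : List String) (groups : List String) : Bool :=
  groups.any (fun it => !(normItem it == "") && c.contains (normItem it))

def M (role_map : List (String × List String)) (groups : List String) : Option (Int × String) :=
  if hC (candsOf role_map "admin") groups then some (0, "admin")
  else if hC (candsOf role_map "operator") groups then some (1, "operator")
  else if hC (candsOf role_map "auditor") groups then some (2, "auditor")
  else none

def render (o : Option (Int × String)) : String :=
  match o with
  | some p => p.2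
  | none => "viewer"

theorem get?_foldIns (gs : List String) (idx : PySem.Dict String (Int × String))
    (v : Int × String) (x : String) :
    ((gs.foldl (fun idx g => if idx.contains g then idx else idx.insert g v) idx).get? x)
      = if (idx.get? x).isSome then idx.get? x
        else if gs.contains x then some v else none := by
  induction gs generalizing idx with
  | nil => simp
  | cons g gs ih =>
    simp only [List.foldl_cons]
    by_cases hc : idx.contains g = true
    · rw [if_pos hc, ih]
      by_cases hx : x = g
      · subst hx
        rw [PySem.Dict.contains_eq_isSome_get?] at hc
        simp [hc]
      · simp [hx]
    · rw [if_neg hc, ih]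
      by_cases hx : x = g
      · subst hx
        rw [PySem.Dict.contains_eq_isSome_get?] at hc
        simp only [Bool.not_eq_true, Option.isSome_eq_false_iff, Option.isNone_iff_eq_none] at hc
        simp [hc]
      · simp [PySem.Dict.get?_insert, hx]

theorem bBetter_none_left (h : Option (Int × String)) : bBetter none h = h := by
  cases h <;> rfl

theorem bBetter_assoc (a b c : Option (Int × String)) :
    bBetter (bBetter a b) c = bBetter a (bBetter b c) := by
  rcases a with _ | a <;> rcases b with _ | b <;> rcases c with _ | c <;>
    first
      | (by_cases h1 : b.1 < a.1 <;> by_cases h2 : c.1 < b.1 <;> by_cases h3 : c.1 < a.1 <;>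
          simp [bBetter, h1, h2, h3] <;> omega)
      | (simp [bBetter]; try (split_ifs <;> rfl))

theorem hC_iff (c groups : List String) :
    hC c groups = true ↔
      ∃ x ∈ (groups.map normItem).filter (fun s => !(s == "")), c.contains x = true := by
  simp only [hC, List.any_eq_true, List.mem_filter, List.mem_map]
  constructor
  · rintro ⟨it, hit, h⟩
    simp only [Bool.and_eq_true] at h
    exact ⟨normItem it, ⟨⟨it, hit, rfl⟩, h.1⟩, h.2⟩
  · rintro ⟨x, ⟨⟨it, hit, rfl⟩, hne⟩, hc⟩
    exact ⟨it, hit, by rw [Bool.and_eq_true]; exact ⟨hne, hc⟩⟩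

theorem inter_empty_iff (groups c : List String) :
    ((PySem.Set.inter
        (PySem.Set.ofList ((groups.map normItem).filter (fun s => !(s == ""))))
        (PySem.Set.ofList c)).isEmpty = true) ↔
      hC c groups = false := by
  rw [Bool.eq_false_iff, ne_eq, hC_iff]
  rw [List.isEmpty_iff, List.eq_nil_iff_forall_not_mem]
  constructor
  · rintro h ⟨x, hx, hc⟩
    exact h x (by
      rw [PySem.Set.mem_inter, PySem.Set.mem_ofList, PySem.Set.mem_ofList]
      exact ⟨hx, by simpa using hc⟩)
  · intro h x hxm
    rw [PySem.Set.mem_inter, PySem.Set.mem_ofList, PySem.Set.mem_ofList] at hxm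
    exact h ⟨x, hxm.1, by simpa using hxm.2⟩

theorem ofList_ne_nil (x : String) (xs : List String) :
    PySem.Set.ofList (x :: xs) ≠ [] := by
  intro h
  have hx : x ∈ PySem.Set.ofList (x :: xs) := (PySem.Set.mem_ofList _ _).mpr List.mem_cons_self
  rw [h] at hx
  exact absurd hx (List.not_mem_nil)

theorem hC_of_nil (c groups : List String)
    (h : (groups.map normItem).filter (fun s => !(s == "")) = []) : hC c groups = false := by
  rw [Bool.eq_false_iff, ne_eq, hC_iff, h]
  simp

theorem A_char (groups : List String) (role_map : List (String × List String)) :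
    resolve_sso_role_py groups role_map = render (M role_map groups) := by
  unfold resolve_sso_role_py
  simp only [aRoleLoop]
  by_cases hL : (groups.map normItem).filter (fun s => !(s == "")) = []
  · rw [hL]
    simp [M, render, hC_of_nil _ _ hL]
  · obtain ⟨x, xs, hxx⟩ : ∃ x xs, (groups.map normItem).filter (fun s => !(s == "")) = x :: xs := by
      rcases h : (groups.map normItem).filter (fun s => !(s == "")) with _ | ⟨x, xs⟩
      · exact absurd h hL
      · exact ⟨x, xs, rfl⟩
    rw [hxx]
    rw [if_neg (by simpa using ofList_ne_nil x xs)]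
    rw [← hxx]
    simp only [inter_empty_iff]
    by_cases h0 : hC (candsOf role_map "admin") groups = true <;>
      by_cases h1 : hC (candsOf role_map "operator") groups = true <;>
        by_cases h2 : hC (candsOf role_map "auditor") groups = true <;>
          (simp only [candsOf] at h0 h1 h2 ⊢; simp [M, render, candsOf, h0, h1, h2])

theorem hC_cons (c : List String) (it : String) (rest : List String) :
    hC c (it :: rest) = (((!(normItem it == "")) && c.contains (normItem it)) || hC c rest) := rfl

theorem M_nil (role_map : List (String × List String)) : M role_map [] = none := by
  simp [M, hC]

theorem M_cons (role_map : List (String × List String)) (it : String) (rest : List String) :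
    M role_map (it :: rest) =
      bBetter (if normItem it == "" then none else hitVal role_map (normItem it))
        (M role_map rest) := by
  by_cases hn : (normItem it == "") = true
  · simp [M, hC_cons, hn, bBetter_none_left]
  · by_cases h0 : normItem it ∈ candsOf role_map "admin" <;>
      by_cases h1 : normItem it ∈ candsOf role_map "operator" <;>
        by_cases h2 : normItem it ∈ candsOf role_map "auditor" <;>
          by_cases r0 : hC (candsOf role_map "admin") rest = true <;>
            by_cases r1 : hC (candsOf role_map "operator") rest = true <;>
              by_cases r2 : hC (candsOf role_map "auditor") rest = true <;>
                simp [M, hC_cons, hitVal, bBetter, hn, h0, h1, h2, r0, r1, r2]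

theorem bIndex_get? (role_map : List (String × List String)) (x : String) :
    (bIndex role_map).get? x = hitVal role_map x := by
  show ((((PySem.List.enumerate pvRoles).foldl _ PySem.Dict.empty)).get? x) = _
  simp only [pvRoles, PySem.List.enumerate_cons, PySem.List.enumerate_nil,
    List.foldl_cons, List.foldl_nil]
  rw [get?_foldIns, get?_foldIns, get?_foldIns]
  simp only [PySem.Dict.get?_empty, Option.isSome_none, Bool.false_eq_true, if_false]
  unfold hitVal candsOf
  norm_num
  split_ifs <;> simp_all

theorem bScan_eq (role_map : List (String × List String)) (groups : List String)
    (best : Option (Int × String)) :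
    bScan (bIndex role_map) best groups = bBetter best (M role_map groups) := by
  induction groups generalizing best with
  | nil => rw [M_nil]; rfl
  | cons it rest ih =>
    rw [M_cons]
    simp only [bScan]
    by_cases hn : (normItem it == "") = true
    · rw [if_pos hn, if_pos hn, ih, bBetter_none_left]
    · rw [if_neg hn, if_neg hn, ih, bIndex_get?, bBetter_assoc]

-- ===== VERDICT (by name: the statement is the Claim_ definition above) =====
theorem resolve_sso_role_py_spec : Claim_equal_resolve_sso_role_py := by
  intro groups role_map _
  unfold Spec_resolve_sso_role_py
  rw [A_char]
  unfold resolve_sso_role_py_alt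
  rw [bScan_eq]
  cases M role_map groups <;> rfl
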